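-- pv_equiv track=rewrite | github.com/steveelliott7717/personal-agent-ste | backend/api.py | _parse_files_artifact
-- ===== SOURCE A (Python) =====
-- def _parse_files_artifact(s: str) -> dict[str, str]:
--     """
--     Parse a FILES artifact:
--
--       BEGIN_FILE path/to/file
--       <entire new file content>
--       END_FILE
--
--     Returns: { "path/to/file": "<content>", ... }
--     """
--     files: dict[str, str] = {}
--     cur: str | None = None
--     buf: list[str] = []
--     for line in s.splitlines(keepends=True):
--         if line.startswith("BEGIN_FILE "):
--             if cur is not None:
--                 files[cur] = "".join(buf)
--                 buf.clear()
--             cur = line[len("BEGIN_FILE ") :].strip()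
--             continue
--         if line.startswith("END_FILE"):
--             if cur is not None:
--                 files[cur] = "".join(buf)
--                 cur = None
--                 buf.clear()
--             continue
--         if cur is not None:
--             buf.append(line)
--     if cur is not None:
--         files[cur] = "".join(buf)
--     return files
-- ===== SOURCE B (Python) =====
-- def _parse_files_artifact(s: str) -> dict[str, str]:
--     """Two-level scan: find each BEGIN_FILE header, then grab the whole
--     following block of non-marker lines in one slice."""
--     files: dict[str, str] = {}
--     lines = s.splitlines(keepends=True)
--     n = len(lines)
--     i = 0
--     while i < n:
--         line = lines[i]
--         i += 1
--         if not line.startswith("BEGIN_FILE "):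
--             continue
--         path = line[len("BEGIN_FILE "):].strip()
--         j = i
--         while j < n and not (lines[j].startswith("BEGIN_FILE ")
--                              or lines[j].startswith("END_FILE")):
--             j += 1
--         files[path] = "".join(lines[i:j])
--         i = j
--         if i < n and lines[i].startswith("END_FILE"):
--             i += 1
--     return files
-- ===== Notes on version B (the rewrite author's own statement) =====
-- stated objective: alternative
-- what changed: Replaced A's flat per-line state machine (current path + growing buffer) by a two-level scan that locates each BEGIN_FILE header with an outer index loop and then slices out the whole following block of non-marker lines in one inner scan, joining each block into its file content.
import Mathlib
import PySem

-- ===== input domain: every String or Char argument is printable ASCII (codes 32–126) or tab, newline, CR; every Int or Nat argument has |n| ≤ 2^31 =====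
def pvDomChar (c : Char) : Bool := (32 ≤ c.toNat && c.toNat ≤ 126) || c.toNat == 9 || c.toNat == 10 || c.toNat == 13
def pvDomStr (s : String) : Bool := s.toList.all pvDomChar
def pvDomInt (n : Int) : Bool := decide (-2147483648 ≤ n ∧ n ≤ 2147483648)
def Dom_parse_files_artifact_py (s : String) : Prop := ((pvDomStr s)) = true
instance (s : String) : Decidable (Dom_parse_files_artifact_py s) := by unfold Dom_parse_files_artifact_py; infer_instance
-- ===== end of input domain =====

-- B replaces A's flat per-line state machine (current path + buffer) by a two-level
-- scan that finds each BEGIN_FILE header and grabs the whole following block of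
-- non-marker lines at once; same return value, objective: alternative decomposition.

-- shared constants and the shared library call s.splitlines(keepends=True):
-- hand-ported, exact on the ASCII domain (line boundaries there are '\n', '\r', '\r\n';
-- the other Unicode boundaries Python knows cannot occur inside Dom_).
def pvBegin : List Char := ['B','E','G','I','N','_','F','I','L','E',' ']
def pvEnd : List Char := ['E','N','D','_','F','I','L','E']

def pvSplitKeep (acc : List Char) : List Char → List (List Char)
  | [] => if acc.isEmpty then [] else [acc.reverse]
  | '\r' :: '\n' :: rest => (acc.reverse ++ ['\r', '\n']) :: pvSplitKeep [] rest
  | '\r' :: rest => (acc.reverse ++ ['\r']) :: pvSplitKeep [] rest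
  | '\n' :: rest => (acc.reverse ++ ['\n']) :: pvSplitKeep [] rest
  | c :: rest => pvSplitKeep (c :: acc) rest

-- ===== PORT A =====
-- loop body of A: state (files, cur, buf); "".join(buf) on char-list lines is flatten
def pvStepA (st : PySem.Dict String String × Option String × List (List Char))
    (line : List Char) : PySem.Dict String String × Option String × List (List Char) :=
  let (files, cur, buf) := st
  if PySem.Chars.startswith line pvBegin then
    match cur with
    | some c => (files.insert c (String.mk buf.flatten),
                 some (String.mk (PySem.Chars.strip (line.drop 11))), [])
    | none => (files, some (String.mk (PySem.Chars.strip (line.drop 11))), buf)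
  else if PySem.Chars.startswith line pvEnd then
    match cur with
    | some c => (files.insert c (String.mk buf.flatten), none, [])
    | none => (files, cur, buf)
  else
    match cur with
    | some _ => (files, cur, buf ++ [line])
    | none => (files, cur, buf)

-- the trailing 'if cur is not None: files[cur] = "".join(buf)'
def pvFinishA (st : PySem.Dict String String × Option String × List (List Char)) :
    PySem.Dict String String :=
  let (files, cur, buf) := st
  match cur with
  | some c => files.insert c (String.mk buf.flatten)
  | none => files

def parse_files_artifact_py (s : String) : List (String × String) :=
  (pvFinishA ((pvSplitKeep [] s.toList).foldl pvStepA (PySem.Dict.empty, none, []))).items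

-- ===== PORT B =====
def pvIsMarker (l : List Char) : Bool :=
  PySem.Chars.startswith l pvBegin || PySem.Chars.startswith l pvEnd

-- outer scan of B; the inner 'while … not marker' loop is takeWhile/dropWhile
def pvScanB (files : PySem.Dict String String) :
    List (List Char) → PySem.Dict String String
  | [] => files
  | line :: rest =>
    if PySem.Chars.startswith line pvBegin then
      let path := String.mk (PySem.Chars.strip (line.drop 11))
      let files' := files.insert path
        (String.mk (rest.takeWhile (fun l => !pvIsMarker l)).flatten)
      match h : rest.dropWhile (fun l => !pvIsMarker l) with
      | [] => files'
      | l :: tl =>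
        if PySem.Chars.startswith l pvEnd then pvScanB files' tl
        else pvScanB files' (l :: tl)
    else pvScanB files rest
  termination_by lines => lines.length
  decreasing_by
  · have := List.length_dropWhile_le (fun l => !pvIsMarker l) rest
    rw [h] at this; simp at this ⊢; omega
  · have := List.length_dropWhile_le (fun l => !pvIsMarker l) rest
    rw [h] at this; simp at this ⊢; omega
  · simp

def parse_files_artifact_py_alt (s : String) : List (String × String) :=
  (pvScanB PySem.Dict.empty (pvSplitKeep [] s.toList)).items

-- ===== PRECONDITION & SPEC =====
def Spec_parse_files_artifact_py (s : String) (out : List (String × String)) : Prop := out = parse_files_artifact_py_alt s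
instance (s : String) (out : List (String × String)) : Decidable (Spec_parse_files_artifact_py s out) := by unfold Spec_parse_files_artifact_py; infer_instance

-- ===== CLAIM (what is proved, stated in full; the proofs are below) =====
def Claim_equal_parse_files_artifact_py : Prop := ∀ (s : String), Dom_parse_files_artifact_py s → Spec_parse_files_artifact_py s (parse_files_artifact_py s)

-- ===== LEMMAS AND PROOFS =====

-- what the fold does after a marker line was reached while a file was open
def pvAfter (files : PySem.Dict String String) (r : List (List Char)) :
    PySem.Dict String String :=
  match r with
  | [] => files
  | l :: tl =>
    if PySem.Chars.startswith l pvEnd then pvScanB files tl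
    else pvScanB files (l :: tl)

theorem pv_begin_not_end {l : List Char}
    (h : PySem.Chars.startswith l pvBegin = true) :
    PySem.Chars.startswith l pvEnd = false := by
  rw [PySem.Chars.startswith_iff] at h
  by_contra hc
  rw [Bool.not_eq_false, PySem.Chars.startswith_iff] at hc
  obtain ⟨u, hu⟩ := h
  obtain ⟨v, hv⟩ := hc
  rw [← hu] at hv
  simp [pvBegin, pvEnd] at hv

theorem pvScanB_nil (files : PySem.Dict String String) : pvScanB files [] = files := by
  simp [pvScanB]

theorem pvScanB_begin (files : PySem.Dict String String) (ln : List Char)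
    (rest : List (List Char)) (hb : PySem.Chars.startswith ln pvBegin = true) :
    pvScanB files (ln :: rest) =
      pvAfter (files.insert (String.mk (PySem.Chars.strip (ln.drop 11)))
          (String.mk (rest.takeWhile (fun l => !pvIsMarker l)).flatten))
        (rest.dropWhile (fun l => !pvIsMarker l)) := by
  rw [pvScanB]
  simp only [hb, if_true]
  split
  · next heq => simp [pvAfter, heq]
  · next l tl heq => simp [pvAfter, heq]

theorem pvScanB_not_begin (files : PySem.Dict String String) (ln : List Char)
    (rest : List (List Char)) (hb : ¬ PySem.Chars.startswith ln pvBegin = true) :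
    pvScanB files (ln :: rest) = pvScanB files rest := by
  rw [pvScanB]
  simp [hb]

theorem pvMain (n : Nat) : ∀ lines : List (List Char), lines.length ≤ n →
    (∀ files, pvFinishA (lines.foldl pvStepA (files, none, [])) = pvScanB files lines) ∧
    (∀ files c buf, pvFinishA (lines.foldl pvStepA (files, some c, buf)) =
      pvAfter (files.insert c
          (String.mk (buf ++ lines.takeWhile (fun l => !pvIsMarker l)).flatten))
        (lines.dropWhile (fun l => !pvIsMarker l))) := by
  induction n with
  | zero =>
    intro lines hlen
    have : lines = [] := List.eq_nil_of_length_eq_zero (Nat.le_zero.mp hlen)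
    subst this
    exact ⟨fun files => by simp [pvFinishA, pvScanB_nil],
           fun files c buf => by simp [pvFinishA, pvAfter]⟩
  | succ n ih =>
    intro lines hlen
    match lines with
    | [] =>
      exact ⟨fun files => by simp [pvFinishA, pvScanB_nil],
             fun files c buf => by simp [pvFinishA, pvAfter]⟩
    | ln :: rest =>
      have hr : rest.length ≤ n := by simp at hlen; omega
      constructor
      · intro files
        by_cases hb : PySem.Chars.startswith ln pvBegin = true
        · -- BEGIN with no open file: open it (buf stays [])
          rw [List.foldl_cons]
          simp only [pvStepA, hb, if_true]
          rw [(ih rest hr).2, pvScanB_begin files ln rest hb]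
          simp
        · by_cases he : PySem.Chars.startswith ln pvEnd = true
          · rw [List.foldl_cons]
            simp only [pvStepA, hb, he, if_true, if_false, Bool.false_eq_true]
            rw [(ih rest hr).1, pvScanB_not_begin files ln rest hb]
          · rw [List.foldl_cons]
            simp only [pvStepA, hb, he, if_false, Bool.false_eq_true]
            rw [(ih rest hr).1, pvScanB_not_begin files ln rest hb]
      · intro files c buf
        by_cases hb : PySem.Chars.startswith ln pvBegin = true
        · -- marker BEGIN: A flushes and reopens; B re-processes the BEGIN line
          have hm : pvIsMarker ln = true := by simp [pvIsMarker, hb]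
          rw [List.foldl_cons]
          simp only [pvStepA, hb, if_true]
          rw [(ih rest hr).2]
          rw [List.takeWhile_cons, List.dropWhile_cons]
          simp only [hm, Bool.not_true, if_false, Bool.false_eq_true]
          rw [pvAfter]
          simp only [pv_begin_not_end hb, if_false, Bool.false_eq_true]
          rw [pvScanB_begin _ ln rest hb]
          simp
        · by_cases he : PySem.Chars.startswith ln pvEnd = true
          · -- marker END: A flushes and closes; B consumes the END line
            have hm : pvIsMarker ln = true := by simp [pvIsMarker, he]
            rw [List.foldl_cons]
            simp only [pvStepA, hb, he, if_true, if_false, Bool.false_eq_true]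
            rw [(ih rest hr).1]
            rw [List.takeWhile_cons, List.dropWhile_cons]
            simp only [hm, Bool.not_true, if_false, Bool.false_eq_true]
            rw [pvAfter]
            simp [he]
          · -- content line: appended to the open buffer / part of B's block
            have hm : pvIsMarker ln = false := by simp [pvIsMarker, hb, he]
            rw [List.foldl_cons]
            simp only [pvStepA, hb, he, if_false, Bool.false_eq_true]
            rw [(ih rest hr).2]
            rw [List.takeWhile_cons, List.dropWhile_cons]
            simp only [hm, Bool.not_false, if_true]
            simp

-- ===== VERDICT (by name: the statement is the Claim_ definition above) =====
theorem parse_files_artifact_py_spec : Claim_equal_parse_files_artifact_py := by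
  intro s _
  unfold Spec_parse_files_artifact_py parse_files_artifact_py parse_files_artifact_py_alt
  congr 1
  exact ((pvMain (pvSplitKeep [] s.toList).length _ le_rfl).1 PySem.Dict.empty)
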